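-- pv_equiv track=rewrite | github.com/Taoge123/OptimizedLeetcode | LeetcodeNew/python/LC_809.py | check
-- ===== SOURCE A (Python) =====
-- def check(s, w):
--     # lllll
--     n, m = len(s), len(w)
--     j = 0
--     for i in range(n):
--         if j < m and s[i] == w[j]:
--             j += 1
--         elif s[i - 1:i + 2] != s[i] * 3 != s[i - 2:i + 1]:
--             return False
--
--     return j == m
-- ===== SOURCE B (Python) =====
-- def _groups(t):
--     g = []
--     i = 0
--     while i < len(t):
--         k = i
--         while k < len(t) and t[k] == t[i]:
--             k += 1
--         g.append((t[i], k - i))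
--         i = k
--     return g
--
--
-- def check(s, w):
--     gs = _groups(s)
--     gw = _groups(w)
--     if len(gs) != len(gw):
--         return False
--     for (cs, ns), (cw, nw) in zip(gs, gw):
--         if cs != cw or (ns != nw and (ns < 3 or ns < nw)):
--             return False
--     return True
-- ===== Notes on version B (the rewrite author's own statement) =====
-- stated objective: alternative
-- what changed: Replaced the two-pointer scan with sliding 3-char slice windows by run-length-encoding both strings once and comparing the group lists pairwise (same char, equal counts or source count >= 3 and >= target count).
import Mathlib
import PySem

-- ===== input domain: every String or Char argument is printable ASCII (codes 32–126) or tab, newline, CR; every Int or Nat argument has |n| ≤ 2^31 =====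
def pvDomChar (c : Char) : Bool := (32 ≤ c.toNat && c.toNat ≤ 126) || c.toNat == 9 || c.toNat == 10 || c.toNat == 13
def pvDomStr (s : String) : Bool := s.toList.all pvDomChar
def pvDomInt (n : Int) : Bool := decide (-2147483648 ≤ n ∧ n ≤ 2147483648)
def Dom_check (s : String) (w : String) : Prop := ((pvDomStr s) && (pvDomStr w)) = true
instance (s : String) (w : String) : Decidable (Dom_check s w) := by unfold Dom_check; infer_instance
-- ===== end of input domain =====

-- B replaces A's two-pointer scan with 3-char slice windows by run-length encoding both
-- strings once and comparing the group lists pairwise (alternative decomposition, same cost).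

-- ===== PORT A =====
def checkGo (cs ws : List Char) (i j : Nat) : Bool :=
  if h : i < cs.length then
    if j < ws.length ∧ ws[j]? = some cs[i] then
      checkGo cs ws (i+1) (j+1)
    else if PySem.List.slice cs (some ((i:Int)-1)) (some ((i:Int)+2)) ≠ [cs[i], cs[i], cs[i]] ∧
            PySem.List.slice cs (some ((i:Int)-2)) (some ((i:Int)+1)) ≠ [cs[i], cs[i], cs[i]] then
      false
    else checkGo cs ws (i+1) j
  else j == ws.length
termination_by cs.length - i

def check (s : String) (w : String) : Bool := checkGo s.toList w.toList 0 0


-- ===== PORT B =====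
def grp : List Char → List (Char × Nat)
  | [] => []
  | c :: rest =>
    let run := rest.takeWhile (fun x => x == c)
    (c, run.length + 1) :: grp (rest.drop run.length)
termination_by l => l.length
decreasing_by simp [List.length_drop]

def grpOk (g h : Char × Nat) : Bool :=
  g.1 == h.1 && (g.2 == h.2 || (decide (3 ≤ g.2) && decide (h.2 ≤ g.2)))

def check_alt (s : String) (w : String) : Bool :=
  let gs := grp s.toList
  let gw := grp w.toList
  if gs.length ≠ gw.length then false
  else (gs.zip gw).all (fun p => grpOk p.1 p.2)


-- ===== PRECONDITION & SPEC =====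
def Spec_check (s : String) (w : String) (out : Bool) : Prop := out = check_alt s w
instance (s : String) (w : String) (out : Bool) : Decidable (Spec_check s w out) := by unfold Spec_check; infer_instance

-- ===== CLAIM (what is proved, stated in full; the proofs are below) =====
def Claim_equal_check : Prop := ∀ (s : String) (w : String), Dom_check s w → Spec_check s w (check s w)

-- ===== LEMMAS AND PROOFS =====
-- proof-side model of A's loop: p2/p1 are the two previously seen characters
def loopL : Option Char → Option Char → List Char → List Char → Bool
  | _, _, [], wr => wr.isEmpty
  | p2, p1, c :: rest, wr =>
    if wr.head? = some c then loopL p1 (some c) rest wr.tail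
    else if (p1 = some c ∧ rest.head? = some c) ∨ (p2 = some c ∧ p1 = some c) then
      loopL p1 (some c) rest wr
    else false

def cmpG : List (Char × Nat) → List (Char × Nat) → Bool
  | [], [] => true
  | g :: gs, h :: hs => grpOk g h && cmpG gs hs
  | _, _ => false

lemma cmpG_eq (gs : List (Char × Nat)) : ∀ hs,
    cmpG gs hs = ((gs.length == hs.length) && (gs.zip hs).all (fun p => grpOk p.1 p.2)) := by
  induction gs with
  | nil => intro hs; cases hs <;> simp [cmpG]
  | cons g gs ih =>
    intro hs
    cases hs with
    | nil => simp [cmpG]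
    | cons h hs =>
      simp [cmpG, ih hs]
      by_cases hg : grpOk g h <;> simp [hg]

lemma alt_eq (s w : String) : check_alt s w = cmpG (grp s.toList) (grp w.toList) := by
  rw [cmpG_eq]
  simp only [check_alt]
  by_cases h : (grp s.toList).length = (grp w.toList).length <;> simp [h]

lemma dropWhile_eq_drop (p : Char → Bool) : ∀ (l : List Char),
    l.dropWhile p = l.drop (l.takeWhile p).length := by
  intro l
  induction l with
  | nil => rfl
  | cons a l ih => by_cases hp : p a <;> simp [List.dropWhile_cons, hp, ih]

lemma head?_dropWhile (p : Char → Bool) : ∀ (l : List Char) (x : Char),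
    (l.dropWhile p).head? = some x → p x = false := by
  intro l
  induction l with
  | nil => intro x h; simp [List.dropWhile] at h
  | cons a l ih =>
    intro x h
    rw [List.dropWhile_cons] at h
    by_cases hp : p a
    · simp [hp] at h; exact ih x h
    · simp [hp] at h
      subst h
      simpa using hp

-- group decomposition of a nonempty list
lemma grp_decomp (c : Char) (rest : List Char) :
    c :: rest = List.replicate ((rest.takeWhile (fun x => x == c)).length + 1) c
        ++ rest.drop (rest.takeWhile (fun x => x == c)).length ∧
    (rest.drop (rest.takeWhile (fun x => x == c)).length).head? ≠ some c ∧
    grp (c :: rest) = (c, (rest.takeWhile (fun x => x == c)).length + 1)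
        :: grp (rest.drop (rest.takeWhile (fun x => x == c)).length) := by
  have hrepl : rest.takeWhile (fun x => x == c)
      = List.replicate (rest.takeWhile (fun x => x == c)).length c := by
    apply List.eq_replicate_of_mem
    intro b hb
    have := List.mem_takeWhile_imp hb
    simpa using this
  have hdrop : rest.drop (rest.takeWhile (fun x => x == c)).length
      = rest.dropWhile (fun x => x == c) := (dropWhile_eq_drop _ rest).symm
  refine ⟨?_, ?_, ?_⟩
  · rw [hdrop, List.replicate_succ, List.cons_append]
    conv_lhs => rw [← List.takeWhile_append_dropWhile (p := fun x => x == c) (l := rest)]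
    rw [hrepl]
    simp
  · rw [hdrop]
    intro hh
    have := head?_dropWhile _ _ _ hh
    simp at this
  · rw [grp]

lemma run_nomatch (c : Char) (rest' ws2 : List Char) (hr : rest'.head? ≠ some c)
    (hw : ws2.head? ≠ some c) :
    ∀ u, 1 ≤ u → ∀ p2, loopL p2 (some c) (List.replicate u c ++ rest') ws2 =
      if u = 1 ∧ p2 ≠ some c then false else loopL (some c) (some c) rest' ws2 := by
  intro u
  induction u with
  | zero => intro h; omega
  | succ u ih =>
    intro _ p2
    rw [List.replicate_succ, List.cons_append, loopL]
    rw [if_neg hw]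
    cases u with
    | zero =>
      simp only [List.replicate_zero, List.nil_append]
      by_cases hp2 : p2 = some c
      · rw [if_pos (by simp [hp2])]
        rw [if_neg (by simp [hp2])]
      · rw [if_neg (by simp [hr, hp2]), if_pos (by simp [hp2])]
    | succ v =>
      have hmid : ((List.replicate (v+1) c ++ rest').head? = some c) := by
        simp [List.replicate_succ]
      rw [if_pos (by simp [hmid])]
      rw [ih (by omega) (some c)]
      rw [if_neg (by simp), if_neg (by rintro ⟨h1, -⟩; omega)]

lemma run_match (c : Char) (rest' ws' : List Char) (hr : rest'.head? ≠ some c)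
    (hw : ws'.head? ≠ some c) :
    ∀ a u p2, loopL p2 (some c) (List.replicate u c ++ rest') (List.replicate a c ++ ws') =
      if a < u then
        (if u = 1 ∧ a = 0 ∧ p2 ≠ some c then false else loopL (some c) (some c) rest' ws')
      else if u = a then loopL (if u = 0 then p2 else some c) (some c) rest' ws'
      else false := by
  intro a
  induction a with
  | zero =>
    intro u p2
    cases u with
    | zero => simp
    | succ v =>
      simp only [List.replicate_zero, List.nil_append]
      rw [run_nomatch c rest' ws' hr hw (v+1) (by omega) p2]
      split_ifs <;> first | rfl | tauto | omega
  | succ a ih =>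
    intro u p2
    cases u with
    | zero =>
      simp only [List.replicate_zero, List.nil_append]
      rw [if_neg (by omega), if_neg (by omega)]
      cases hres : rest' with
      | nil => simp [loopL, List.replicate_succ]
      | cons c' r2 =>
        have hc' : ¬ (c = c') := by
          intro e; apply hr; rw [hres, e]; rfl
        rw [loopL]
        rw [if_neg (by simp [List.replicate_succ, hc'])]
        rw [if_neg (by simp [hc'])]
    | succ u =>
      rw [List.replicate_succ, List.cons_append, loopL]
      rw [List.replicate_succ (n := a), List.cons_append]
      rw [if_pos (by rfl)]
      simp only [List.tail_cons]
      rw [ih u (some c)]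
      split_ifs <;> first | rfl | tauto | omega | (cases u <;> simp) | simp

lemma loop_eq : ∀ (n : Nat) (cs ws : List Char) (p2 p1 : Option Char), cs.length ≤ n →
    (∀ c, cs.head? = some c → p1 ≠ some c) →
    loopL p2 p1 cs ws = cmpG (grp cs) (grp ws) := by
  intro n
  induction n with
  | zero =>
    intro cs ws p2 p1 hn _
    have hcs : cs = [] := by
      cases cs with
      | nil => rfl
      | cons a l => simp at hn
    subst hcs
    cases ws with
    | nil => simp [loopL, grp, cmpG]
    | cons w0 wr => rw [(grp_decomp w0 wr).2.2]; simp [loopL, grp, cmpG]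
  | succ n ih =>
    intro cs ws p2 p1 hn hp1
    cases cs with
    | nil =>
      cases ws with
      | nil => simp [loopL, grp, cmpG]
      | cons w0 wr => rw [(grp_decomp w0 wr).2.2]; simp [loopL, grp, cmpG]
    | cons c rest =>
      obtain ⟨hdec, hhd, hgrp⟩ := grp_decomp c rest
      have hrest : rest = List.replicate (rest.takeWhile (fun x => x == c)).length c
          ++ rest.drop (rest.takeWhile (fun x => x == c)).length := by
        have h2 := hdec
        rw [List.replicate_succ, List.cons_append] at h2
        exact ((List.cons.injEq _ _ _ _).mp h2).2
      have hp1c : p1 ≠ some c := hp1 c rfl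
      have hlen' : (rest.drop (rest.takeWhile (fun x => x == c)).length).length ≤ n := by
        have h1 : rest.length ≤ n := by simpa using hn
        have h3 := @List.length_drop Char ((rest.takeWhile (fun x => x == c)).length) rest
        omega
      have hinv : ∀ c'', (rest.drop (rest.takeWhile (fun x => x == c)).length).head? = some c''
          → (some c : Option Char) ≠ some c'' := by
        intro c'' h e
        apply hhd
        rw [h, ← e]
      cases ws with
      | nil =>
        rw [loopL, if_neg (by simp), if_neg (by simp [hp1c]), hgrp]
        simp [grp, cmpG]
      | cons w0 wr =>
        by_cases hw0 : w0 = c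
        · subst hw0
          obtain ⟨hdecw, hhdw, hgrpw⟩ := grp_decomp w0 wr
          have hwr : wr = List.replicate (wr.takeWhile (fun x => x == w0)).length w0
              ++ wr.drop (wr.takeWhile (fun x => x == w0)).length := by
            have h2 := hdecw
            rw [List.replicate_succ, List.cons_append] at h2
            exact ((List.cons.injEq _ _ _ _).mp h2).2
          rw [loopL, if_pos (by rfl)]
          simp only [List.tail_cons]
          conv_lhs => rw [hrest, hwr]
          rw [run_match w0 _ _ hhd hhdw _ _ p1]
          rw [hgrp, hgrpw]
          simp only [cmpG]
          have hcmpAny : ∀ q, loopL q (some w0)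
              (rest.drop (rest.takeWhile (fun x => x == w0)).length)
              (wr.drop (wr.takeWhile (fun x => x == w0)).length)
              = cmpG (grp (rest.drop (rest.takeWhile (fun x => x == w0)).length))
                 (grp (wr.drop (wr.takeWhile (fun x => x == w0)).length)) :=
            fun q => ih _ _ q (some w0) hlen' hinv
          split_ifs with h1 h2 h3 h4
          · obtain ⟨hk, ha, -⟩ := h2
            rw [hk, ha]
            simp [grpOk]
          · have hne : ¬((rest.takeWhile (fun x => x == w0)).length = 1
                ∧ (wr.takeWhile (fun x => x == w0)).length = 0) := by
              intro hh; exact h2 ⟨hh.1, hh.2, hp1c⟩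
            have hgOk : grpOk (w0, (rest.takeWhile (fun x => x == w0)).length + 1)
                (w0, (wr.takeWhile (fun x => x == w0)).length + 1) = true := by
              simp [grpOk]; omega
            rw [hgOk, Bool.true_and]
            exact hcmpAny _
          · have hgOk : grpOk (w0, (rest.takeWhile (fun x => x == w0)).length + 1)
                (w0, (wr.takeWhile (fun x => x == w0)).length + 1) = true := by
              simp [grpOk]; omega
            rw [hgOk, Bool.true_and]
            exact hcmpAny _
          · have hgOk : grpOk (w0, (rest.takeWhile (fun x => x == w0)).length + 1)
                (w0, (wr.takeWhile (fun x => x == w0)).length + 1) = true := by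
              simp [grpOk]; omega
            rw [hgOk, Bool.true_and]
            exact hcmpAny _
          · have hgOk : grpOk (w0, (rest.takeWhile (fun x => x == w0)).length + 1)
                (w0, (wr.takeWhile (fun x => x == w0)).length + 1) = false := by
              simp [grpOk]; omega
            rw [hgOk, Bool.false_and]
        · rw [loopL, if_neg (by simp [hw0]), if_neg (by simp [hp1c]), hgrp]
          rw [(grp_decomp w0 wr).2.2]
          simp [cmpG, grpOk, hw0]
          intro e
          exact absurd e.symm hw0

lemma slice_len_le (cs : List Char) (a b : Int) (hb : 0 ≤ b) :
    (PySem.List.slice cs (some a) (some b)).length ≤ b.toNat := by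
  simp [PySem.List.slice, PySem.List.clampIdx]
  split_ifs <;> omega

lemma slice_window (cs : List Char) (i d e : Nat) (hd : d ≤ i) :
    PySem.List.slice cs (some ((i:Int) - (d:Int))) (some ((i:Int) + (e:Int)))
      = (cs.drop (i - d)).take (e + d) := by
  have h1 : ((i:Int) - (d:Int)) = ((i - d : Nat) : Int) := by omega
  have h2 : ((i:Int) + (e:Int)) = ((i + e : Nat) : Int) := by push_cast; ring
  rw [h1, h2, PySem.List.slice_natCast]
  congr 1
  omega

lemma bridge_base (cs ws : List Char) (i j : Nat) (hi : cs.length ≤ i) (hj : j ≤ ws.length) :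
    checkGo cs ws i j = loopL (if 2 ≤ i then cs[i-2]? else none)
      (if 1 ≤ i then cs[i-1]? else none) (cs.drop i) (ws.drop j) := by
  rw [checkGo, dif_neg (by omega)]
  rw [List.drop_eq_nil_of_le hi]
  rw [loopL]
  by_cases h : j = ws.length
  · simp [h, List.isEmpty_iff, List.drop_eq_nil_iff]
  · have h2 : (ws.drop j).isEmpty = false := by
      simp [List.isEmpty_iff, List.drop_eq_nil_iff]
      omega
    rw [h2]
    simp [h]

lemma take3_iff (l : List Char) (x y z : Char) :
    l.take 3 = [x, y, z] ↔ l[0]? = some x ∧ l[1]? = some y ∧ l[2]? = some z := by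
  match l with
  | [] => simp
  | [a] => simp
  | [a, b] => simp
  | a :: b :: c :: t => simp [List.take_succ_cons]

lemma mid_char (cs : List Char) (i : Nat) (h : i < cs.length) :
    (PySem.List.slice cs (some ((i:Int)-1)) (some ((i:Int)+2)) = [cs[i], cs[i], cs[i]])
      ↔ ((if 1 ≤ i then cs[i-1]? else none) = some cs[i]
          ∧ (cs.drop (i+1)).head? = some cs[i]) := by
  by_cases h1 : 1 ≤ i
  · have hsw := slice_window cs i 1 2 h1
    rw [show ((1:Nat):Int) = (1:Int) from by norm_num,
        show ((2:Nat):Int) = (2:Int) from by norm_num] at hsw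
    rw [hsw, show (2+1) = 3 from rfl, take3_iff]
    simp only [List.getElem?_drop, List.head?_drop]
    rw [show i - 1 + 0 = i - 1 from by omega, show i - 1 + 1 = i from by omega,
        show i - 1 + 2 = i + 1 from by omega, if_pos h1]
    simp [List.getElem?_eq_getElem h]
  · have hi0 : i = 0 := by omega
    subst hi0
    constructor
    · intro e
      have hl := slice_len_le cs (((0:Nat):Int)-1) (((0:Nat):Int)+2) (by norm_num)
      rw [e] at hl
      simp at hl
    · intro hc
      simp at hc

lemma end_char (cs : List Char) (i : Nat) (h : i < cs.length) :
    (PySem.List.slice cs (some ((i:Int)-2)) (some ((i:Int)+1)) = [cs[i], cs[i], cs[i]])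
      ↔ ((if 2 ≤ i then cs[i-2]? else none) = some cs[i]
          ∧ (if 1 ≤ i then cs[i-1]? else none) = some cs[i]) := by
  by_cases h2 : 2 ≤ i
  · have hsw := slice_window cs i 2 1 h2
    rw [show ((2:Nat):Int) = (2:Int) from by norm_num,
        show ((1:Nat):Int) = (1:Int) from by norm_num] at hsw
    rw [hsw, show (1+2) = 3 from rfl, take3_iff]
    simp only [List.getElem?_drop]
    rw [show i - 2 + 0 = i - 2 from by omega, show i - 2 + 1 = i - 1 from by omega,
        show i - 2 + 2 = i from by omega, if_pos h2, if_pos (show 1 ≤ i from by omega)]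
    simp [List.getElem?_eq_getElem h]
  · constructor
    · intro e
      have hl := slice_len_le cs ((i:Int)-2) ((i:Int)+1) (by omega)
      rw [e] at hl
      simp at hl
      omega
    · intro hc
      rw [if_neg h2] at hc
      simp at hc

lemma bridge (cs ws : List Char) : ∀ (fuel i j : Nat), cs.length ≤ i + fuel →
    i ≤ cs.length → j ≤ ws.length →
    checkGo cs ws i j = loopL (if 2 ≤ i then cs[i-2]? else none)
      (if 1 ≤ i then cs[i-1]? else none) (cs.drop i) (ws.drop j) := by
  intro fuel
  induction fuel with
  | zero =>
    intro i j hf hi hj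
    exact bridge_base cs ws i j (by omega) hj
  | succ fuel ih =>
    intro i j hf hi hj
    by_cases h : i < cs.length
    · rw [checkGo, dif_pos h]
      rw [List.drop_eq_getElem_cons h, loopL]
      have hhead : (ws.drop j).head? = ws[j]? := List.head?_drop
      have hp2eq : (if 2 ≤ i+1 then cs[i+1-2]? else none)
          = (if 1 ≤ i then cs[i-1]? else none) := by
        by_cases h1 : 1 ≤ i
        · rw [if_pos (by omega), if_pos h1, show i+1-2 = i-1 from by omega]
        · rw [if_neg (by omega), if_neg h1]
      have hp1eq : (if 1 ≤ i+1 then cs[i+1-1]? else none) = some cs[i] := by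
        rw [if_pos (by omega)]
        simp [List.getElem?_eq_getElem h]
      by_cases hm : ws[j]? = some cs[i]
      · have hjlt : j < ws.length := (List.getElem?_eq_some_iff.mp hm).1
        rw [if_pos (show j < ws.length ∧ ws[j]? = some cs[i] from ⟨hjlt, hm⟩),
            if_pos (show (ws.drop j).head? = some cs[i] from by rw [hhead]; exact hm)]
        rw [List.tail_drop]
        rw [ih (i+1) (j+1) (by omega) (by omega) (by omega)]
        rw [hp2eq, hp1eq]
      · rw [if_neg (show ¬(j < ws.length ∧ ws[j]? = some cs[i]) from fun hc => hm hc.2),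
            if_neg (show ¬((ws.drop j).head? = some cs[i]) from by rw [hhead]; exact hm)]
        by_cases hP : (PySem.List.slice cs (some ((i:Int)-1)) (some ((i:Int)+2))
              = [cs[i], cs[i], cs[i]])
            ∨ (PySem.List.slice cs (some ((i:Int)-2)) (some ((i:Int)+1))
              = [cs[i], cs[i], cs[i]])
        · rw [if_neg (show ¬(PySem.List.slice cs (some ((i:Int)-1)) (some ((i:Int)+2))
                ≠ [cs[i], cs[i], cs[i]]
              ∧ PySem.List.slice cs (some ((i:Int)-2)) (some ((i:Int)+1))
                ≠ [cs[i], cs[i], cs[i]]) from by tauto)]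
          rw [if_pos (Or.imp ((mid_char cs i h).mp) ((end_char cs i h).mp) hP)]
          rw [ih (i+1) j (by omega) (by omega) hj]
          rw [hp2eq, hp1eq]
        · rw [not_or] at hP
          rw [if_pos (show (PySem.List.slice cs (some ((i:Int)-1)) (some ((i:Int)+2))
                ≠ [cs[i], cs[i], cs[i]]
              ∧ PySem.List.slice cs (some ((i:Int)-2)) (some ((i:Int)+1))
                ≠ [cs[i], cs[i], cs[i]]) from hP)]
          rw [if_neg (show ¬(((if 1 ≤ i then cs[i-1]? else none) = some cs[i]
                ∧ (cs.drop (i+1)).head? = some cs[i])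
              ∨ ((if 2 ≤ i then cs[i-2]? else none) = some cs[i]
                ∧ (if 1 ≤ i then cs[i-1]? else none) = some cs[i])) from by
            intro hc
            rcases hc with hc | hc
            · exact hP.1 ((mid_char cs i h).mpr hc)
            · exact hP.2 ((end_char cs i h).mpr hc))]
    · exact bridge_base cs ws i j (by omega) hj


-- ===== VERDICT (by name: the statement is the Claim_ definition above) =====
theorem check_spec : Claim_equal_check := by
  intro s w _
  unfold Spec_check
  rw [check, alt_eq]
  rw [bridge s.toList w.toList s.toList.length 0 0 (by omega) (by omega) (by omega)]
  simp only [List.drop_zero]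
  exact loop_eq s.toList.length s.toList w.toList _ _ (le_refl _) (by intro c hc; simp)
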